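-- pv_equiv track=rewrite | github.com/skrendaskrenduolis/aoc2024 | day07/day7.py | recursive_two_ops
-- ===== SOURCE A (Python) =====
-- def recursive_two_ops(goal_number, num_list, current_val):
--     if current_val == goal_number and len(num_list) == 0:
--         return current_val
--     elif current_val != goal_number and len(num_list) == 0:
--         return 0
--     else:
--         next_number = num_list.pop(0)
--         num_list_add = num_list.copy()
--         num_list_mul = num_list.copy()
--         current_val_add = current_val+next_number
--         current_val_mul = current_val*next_number
--         a = recursive_two_ops(goal_number, num_list_add, current_val_add)
--         b = recursive_two_ops(goal_number, num_list_mul, current_val_mul)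
--         if a != 0:
--             return a
--         return b
-- ===== SOURCE B (Python) =====
-- # Set-based reachability DP: one pass over the numbers keeping the deduplicated set of reachable values.
-- # Note: A pops the first element of num_list (observable mutation); B leaves it intact —
-- # the equivalence here is about the return value only.
-- def recursive_two_ops(goal_number, num_list, current_val):
--     vals = {current_val}
--     for n in num_list:
--         vals = {v + n for v in vals} | {v * n for v in vals}
--     return goal_number if goal_number in vals else 0
-- ===== Notes on version B (the rewrite author's own statement) =====
-- stated objective: simpler
-- what changed: Replaces the exponential branching recursion (with list pops/copies and a nonzero-result sentinel) by an iterative breadth-first set DP over the deduplicated set of reachable values, with one goal-membership test at the end.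
import Mathlib
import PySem

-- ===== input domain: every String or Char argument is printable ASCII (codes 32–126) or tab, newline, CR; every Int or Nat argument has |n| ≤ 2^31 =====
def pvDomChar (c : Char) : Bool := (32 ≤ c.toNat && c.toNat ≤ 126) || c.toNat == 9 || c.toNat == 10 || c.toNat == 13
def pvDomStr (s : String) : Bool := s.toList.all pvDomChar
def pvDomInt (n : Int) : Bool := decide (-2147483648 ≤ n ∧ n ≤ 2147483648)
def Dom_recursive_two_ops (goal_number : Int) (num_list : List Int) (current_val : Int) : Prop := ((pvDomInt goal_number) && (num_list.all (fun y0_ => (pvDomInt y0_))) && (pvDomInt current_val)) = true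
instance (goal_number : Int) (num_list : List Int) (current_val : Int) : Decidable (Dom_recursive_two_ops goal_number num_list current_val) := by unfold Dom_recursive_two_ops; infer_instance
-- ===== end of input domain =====

-- B replaces A's exponential branching recursion by an iterative set-based reachability DP
-- (deduplicated set of reachable values, one membership test at the end); equivalence is about
-- the RETURN value only (A pops the first element of the caller's num_list, B does not mutate it).

-- ===== PORT A =====
def recursive_two_ops (goal_number : Int) (num_list : List Int) (current_val : Int) : Int :=
  if current_val = goal_number ∧ num_list.length = 0 then current_val
  else if current_val ≠ goal_number ∧ num_list.length = 0 then 0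
  else
    match num_list with
    | [] => 0   -- unreachable: the two branches above cover the empty list
    | next_number :: rest =>
      let a := recursive_two_ops goal_number rest (current_val + next_number)
      let b := recursive_two_ops goal_number rest (current_val * next_number)
      if a ≠ 0 then a else b

-- ===== PORT B =====
def recursive_two_ops_alt (goal_number : Int) (num_list : List Int) (current_val : Int) : Int :=
  let vals := num_list.foldl
    (fun vs n =>
      PySem.Set.union (PySem.Set.ofList (vs.map (fun v => v + n)))
                      (PySem.Set.ofList (vs.map (fun v => v * n))))
    (PySem.Set.ofList [current_val])
  if PySem.Set.contains vals goal_number then goal_number else 0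

-- ===== PRECONDITION & SPEC =====
def Spec_recursive_two_ops (goal_number : Int) (num_list : List Int) (current_val : Int) (out : Int) : Prop := out = recursive_two_ops_alt goal_number num_list current_val
instance (goal_number : Int) (num_list : List Int) (current_val : Int) (out : Int) : Decidable (Spec_recursive_two_ops goal_number num_list current_val out) := by unfold Spec_recursive_two_ops; infer_instance

-- ===== CLAIM (what is proved, stated in full; the proofs are below) =====
def Claim_equal_recursive_two_ops : Prop := ∀ (goal_number : Int) (num_list : List Int) (current_val : Int), Dom_recursive_two_ops goal_number num_list current_val → Spec_recursive_two_ops goal_number num_list current_val (recursive_two_ops goal_number num_list current_val)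

-- ===== LEMMAS AND PROOFS =====

/-- Whether some +/× combination of the numbers in `l`, applied left-to-right to `c`, hits `g`. -/
def pvReach (g : Int) : List Int → Int → Bool
  | [], c => c == g
  | n :: r, c => pvReach g r (c + n) || pvReach g r (c * n)

lemma recursive_two_ops_char (g : Int) : ∀ (l : List Int) (c : Int),
    recursive_two_ops g l c = if pvReach g l c then g else 0 := by
  intro l
  induction l with
  | nil =>
    intro c
    by_cases h : c = g <;> simp [recursive_two_ops, pvReach, h]
  | cons n r ih =>
    intro c
    rw [recursive_two_ops]
    simp only [List.length_cons, pvReach]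
    rw [if_neg (by simp), if_neg (by simp)]
    simp only [ih]
    by_cases hg : g = 0
    · subst hg; by_cases h1 : pvReach 0 r (c + n) <;> by_cases h2 : pvReach 0 r (c * n) <;>
        simp [h1, h2]
    · by_cases h1 : pvReach g r (c + n) <;> by_cases h2 : pvReach g r (c * n) <;>
        simp [h1, h2, hg]

lemma pvFold_mem (g : Int) : ∀ (l : List Int) (vs : List Int),
    (g ∈ l.foldl
      (fun vs n =>
        PySem.Set.union (PySem.Set.ofList (vs.map (fun v => v + n)))
                        (PySem.Set.ofList (vs.map (fun v => v * n)))) vs)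
    ↔ ∃ c ∈ vs, pvReach g l c = true := by
  intro l
  induction l with
  | nil =>
    intro vs
    simp [pvReach]
  | cons n r ih =>
    intro vs
    rw [List.foldl_cons, ih]
    constructor
    · rintro ⟨c, hc, hr⟩
      rw [PySem.Set.mem_union] at hc
      rcases hc with hc | hc <;> rw [PySem.Set.mem_ofList, List.mem_map] at hc <;>
        rcases hc with ⟨v, hv, rfl⟩
      · exact ⟨v, hv, by simp [pvReach, hr]⟩
      · exact ⟨v, hv, by simp [pvReach, hr]⟩
    · rintro ⟨v, hv, hr⟩
      simp only [pvReach, Bool.or_eq_true] at hr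
      rcases hr with hr | hr
      · refine ⟨v + n, ?_, hr⟩
        simp only [PySem.Set.mem_union, PySem.Set.mem_ofList, List.mem_map]
        exact Or.inl ⟨v, hv, rfl⟩
      · refine ⟨v * n, ?_, hr⟩
        simp only [PySem.Set.mem_union, PySem.Set.mem_ofList, List.mem_map]
        exact Or.inr ⟨v, hv, rfl⟩

lemma recursive_two_ops_alt_char (g : Int) (l : List Int) (c : Int) :
    recursive_two_ops_alt g l c = if pvReach g l c then g else 0 := by
  unfold recursive_two_ops_alt
  by_cases h : pvReach g l c
  · rw [if_pos, if_pos h]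
    rw [PySem.Set.contains_iff, pvFold_mem]
    exact ⟨c, by simp [PySem.Set.ofList], h⟩
  · rw [if_neg, if_neg h]
    rw [PySem.Set.contains_iff, pvFold_mem]
    rintro ⟨c', hc', hr⟩
    simp [PySem.Set.ofList] at hc'
    subst hc'
    exact h hr

-- ===== VERDICT (by name: the statement is the Claim_ definition above) =====
theorem recursive_two_ops_spec : Claim_equal_recursive_two_ops := by
  intro g l c _
  unfold Spec_recursive_two_ops
  rw [recursive_two_ops_char, recursive_two_ops_alt_char]
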